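-- pv_equiv track=rewrite | github.com/a5x/tk667 | Old version/main.py | _is_preserved
-- ===== SOURCE A (Python) =====
-- PRESERVE_PATHS = [
--     "Settings/lang_config.json",
--     "Settings/config.json",
--     "Scripts_info_extract/",
-- ]
--
-- def _is_preserved(rel_path: str) -> bool:
--     rel_path = rel_path.replace("\\", "/")
--     for p in PRESERVE_PATHS:
--         p = p.replace("\\", "/")
--         if p.endswith("/"):
--             if rel_path.startswith(p):
--                 return True
--         else:
--             if rel_path == p:
--                 return True
--     return False
-- ===== SOURCE B (Python) =====
-- def _is_preserved(rel_path: str) -> bool: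
--     # Dispatch on the first path component: split the normalized path at its
--     # first "/" and decide from (head, had_slash, tail) -- no pattern loop.
--     head, sep, tail = rel_path.replace("\\", "/").partition("/")
--     if head == "Scripts_info_extract":
--         return bool(sep)
--     if head == "Settings" and sep:
--         return tail in ("lang_config.json", "config.json")
--     return False
-- ===== Notes on version B (the rewrite author's own statement) =====
-- stated objective: simpler
-- what changed: Instead of looping over PRESERVE_PATHS testing each entry with startswith/equality, B partitions the normalized path at its first '/' once and decides with a small decision tree keyed on the first path component (head, separator-found flag, tail).
import Mathlib
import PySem

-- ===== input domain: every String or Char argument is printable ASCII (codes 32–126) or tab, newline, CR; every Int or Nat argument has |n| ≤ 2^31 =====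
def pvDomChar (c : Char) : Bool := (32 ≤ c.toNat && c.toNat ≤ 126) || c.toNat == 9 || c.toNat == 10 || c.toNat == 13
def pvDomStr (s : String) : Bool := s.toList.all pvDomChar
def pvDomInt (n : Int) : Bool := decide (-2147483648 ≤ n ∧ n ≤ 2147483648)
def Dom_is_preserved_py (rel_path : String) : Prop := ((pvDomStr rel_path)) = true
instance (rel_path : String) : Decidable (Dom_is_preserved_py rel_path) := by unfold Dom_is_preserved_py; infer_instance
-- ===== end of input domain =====

-- B replaces A's per-pattern loop by one partition at the first "/" and a decision tree on the first path component; objective: simpler.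


-- ===== PORT A =====
def pvPreservePaths : List String :=
  ["Settings/lang_config.json", "Settings/config.json", "Scripts_info_extract/"]

-- the 'for p in PRESERVE_PATHS' loop with early return, step for step
def pvLoopA (rel : String) : List String → Bool
  | [] => false
  | p :: rest =>
    let p' := PySem.Str.replace p "\\" "/"
    if PySem.Str.endswith p' "/" then
      if PySem.Str.startswith rel p' then true else pvLoopA rel rest
    else
      if rel == p' then true else pvLoopA rel rest

def is_preserved_py (rel_path : String) : Bool :=
  pvLoopA (PySem.Str.replace rel_path "\\" "/") pvPreservePaths

-- ===== PORT B =====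
-- rel.partition("/") for the one-character separator "/": scan to the FIRST '/',
-- return (head, found-a-separator?, tail); exact for a single-char separator.
def pvPartition : List Char → List Char × Bool × List Char
  | [] => ([], false, [])
  | c :: rest =>
    if c = '/' then ([], true, rest)
    else
      let r := pvPartition rest
      (c :: r.1, r.2.1, r.2.2)

def is_preserved_py_alt (rel_path : String) : Bool :=
  let r := pvPartition (PySem.Str.replace rel_path "\\" "/").toList
  if r.1 == "Scripts_info_extract".toList then r.2.1
  else if r.1 == "Settings".toList && r.2.1 then
    (r.2.2 == "lang_config.json".toList || r.2.2 == "config.json".toList)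
  else false

-- ===== PRECONDITION & SPEC =====
def Spec_is_preserved_py (rel_path : String) (out : Bool) : Prop := out = is_preserved_py_alt rel_path
instance (rel_path : String) (out : Bool) : Decidable (Spec_is_preserved_py rel_path out) := by unfold Spec_is_preserved_py; infer_instance

-- ===== CLAIM (what is proved, stated in full; the proofs are below) =====
def Claim_equal_is_preserved_py : Prop := ∀ (rel_path : String), Dom_is_preserved_py rel_path → Spec_is_preserved_py rel_path (is_preserved_py rel_path)

-- ===== LEMMAS AND PROOFS =====
-- String equality computes on the underlying character lists
theorem pv_str_eq (a b : String) : (a == b) = (a.toList == b.toList) := by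
  cases h : a.toList == b.toList
  · simp only [beq_eq_false_iff_ne] at h ⊢
    intro he; exact h (he ▸ rfl)
  · simp only [beq_iff_eq] at h ⊢
    have := congrArg String.ofList h
    simpa using this

-- the first '/' splits a string uniquely when the head parts are slash-free
theorem pv_slash_inj (h : List Char) : ∀ (p t q : List Char), '/' ∉ h → '/' ∉ p →
    (h ++ '/' :: t = p ++ '/' :: q ↔ h = p ∧ t = q) := by
  induction h with
  | nil =>
    intro p t q _ hp
    cases p with
    | nil => simp
    | cons a as =>
      simp only [List.nil_append, List.cons_append]
      constructor
      · intro he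
        obtain ⟨h1, -⟩ := List.cons_eq_cons.mp he
        exact absurd (h1 ▸ List.mem_cons_self) hp
      · rintro ⟨h1, -⟩; exact absurd h1 (by simp)
  | cons a as ih =>
    intro p t q hh hp
    cases p with
    | nil =>
      simp only [List.nil_append, List.cons_append]
      constructor
      · intro he
        obtain ⟨h1, -⟩ := List.cons_eq_cons.mp he
        exact absurd (h1 ▸ List.mem_cons_self) hh
      · rintro ⟨h1, -⟩; exact absurd h1 (by simp)
    | cons b bs =>
      have hh' : '/' ∉ as := fun m => hh (List.mem_cons_of_mem _ m)
      have hp' : '/' ∉ bs := fun m => hp (List.mem_cons_of_mem _ m)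
      simp only [List.cons_append, List.cons.injEq]
      rw [ih bs t q hh' hp']
      tauto

theorem pv_slash_inj_beq (h p t q : List Char) (hh : '/' ∉ h) (hp : '/' ∉ p) :
    (h ++ '/' :: t == p ++ '/' :: q) = (h == p && t == q) := by
  rw [Bool.eq_iff_iff]
  simp only [beq_iff_eq, Bool.and_eq_true]
  exact pv_slash_inj h p t q hh hp

theorem pv_sw (h t p : List Char) (hh : '/' ∉ h) (hp : '/' ∉ p) :
    PySem.Chars.startswith (h ++ '/' :: t) (p ++ ['/']) = (h == p) := by
  by_cases he : h = p
  · subst he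
    rw [show (h == h) = true from by simp]
    exact (PySem.Chars.startswith_iff _ _).mpr ⟨t, by simp⟩
  · have hnp : ¬ (p ++ ['/']) <+: (h ++ '/' :: t) := by
      rintro ⟨r, hr⟩
      rw [List.append_assoc] at hr
      have := ((pv_slash_inj p h r t hp hh).mp (by simpa using hr)).1
      exact he this.symm
    have hb : PySem.Chars.startswith (h ++ '/' :: t) (p ++ ['/']) = false := by
      cases hsw : PySem.Chars.startswith (h ++ '/' :: t) (p ++ ['/']) with
      | false => rfl
      | true => exact absurd ((PySem.Chars.startswith_iff _ _).mp hsw) hnp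
    rw [hb, show (h == p) = false from by simp [he]]

theorem pv_partition_spec : ∀ (s h t : List Char) (b : Bool), pvPartition s = (h, b, t) →
    (b = true → s = h ++ '/' :: t ∧ '/' ∉ h) ∧ (b = false → h = s ∧ '/' ∉ s) := by
  intro s
  induction s with
  | nil =>
    intro h t b hp
    simp only [pvPartition, Prod.mk.injEq] at hp
    obtain ⟨rfl, rfl, rfl⟩ := hp
    simp
  | cons c cs ih =>
    intro h t b hp
    by_cases hc : c = '/'
    · subst hc
      simp only [pvPartition] at hp
      obtain ⟨rfl, rfl, rfl⟩ := hp
      simp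
    · rcases hq : pvPartition cs with ⟨h', b', t'⟩
      simp only [pvPartition, if_neg hc, hq, Prod.mk.injEq] at hp
      obtain ⟨rfl, rfl, rfl⟩ := hp
      have ih' := ih h' t' b' hq
      constructor
      · intro hb
        obtain ⟨hs, hh⟩ := ih'.1 hb
        refine ⟨by rw [hs]; simp, ?_⟩
        simp only [List.mem_cons, not_or]
        exact ⟨fun e => hc e.symm, hh⟩
      · intro hb
        obtain ⟨hh, hs⟩ := ih'.2 hb
        refine ⟨by rw [hh], ?_⟩
        simp only [List.mem_cons, not_or]
        exact ⟨fun e => hc e.symm, hh ▸ hs⟩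

-- ===== VERDICT (by name: the statement is the Claim_ definition above) =====
theorem is_preserved_py_spec : Claim_equal_is_preserved_py := by
  intro rel_path _
  unfold Spec_is_preserved_py is_preserved_py is_preserved_py_alt
  generalize PySem.Str.replace rel_path "\\" "/" = rel
  simp only [pvLoopA, pvPreservePaths,
    show PySem.Str.replace "Settings/lang_config.json" "\\" "/" = "Settings/lang_config.json" from by decide,
    show PySem.Str.replace "Settings/config.json" "\\" "/" = "Settings/config.json" from by decide,
    show PySem.Str.replace "Scripts_info_extract/" "\\" "/" = "Scripts_info_extract/" from by decide,
    show PySem.Str.endswith "Settings/lang_config.json" "/" = false from by decide,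
    show PySem.Str.endswith "Settings/config.json" "/" = false from by decide,
    show PySem.Str.endswith "Scripts_info_extract/" "/" = true from by decide,
    PySem.Str.startswith_eq, pv_str_eq]
  rcases hP : pvPartition rel.toList with ⟨h, b, t⟩
  have spec := pv_partition_spec rel.toList h t b hP
  cases b with
  | true =>
    obtain ⟨hs, hh⟩ := spec.1 rfl
    rw [hs]
    simp only [
      show ("Settings/lang_config.json".toList : List Char) =
        "Settings".toList ++ '/' :: "lang_config.json".toList from by decide,
      show ("Settings/config.json".toList : List Char) =
        "Settings".toList ++ '/' :: "config.json".toList from by decide,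
      show ("Scripts_info_extract/".toList : List Char) =
        "Scripts_info_extract".toList ++ ['/'] from by decide,
      pv_slash_inj_beq h "Settings".toList t _ hh (by decide),
      pv_sw h t "Scripts_info_extract".toList hh (by decide)]
    cases h1 : (h == "Scripts_info_extract".toList) <;>
    cases h2 : (h == "Settings".toList) <;>
    cases h3 : (t == "lang_config.json".toList) <;>
    cases h4 : (t == "config.json".toList) <;>
      simp_all
  | false =>
    obtain ⟨hh, hns⟩ := spec.2 rfl
    have ne1 : (rel.toList == "Settings/lang_config.json".toList) = false := by
      simp only [beq_eq_false_iff_ne]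
      intro he; exact hns (he ▸ (by decide : '/' ∈ "Settings/lang_config.json".toList))
    have ne2 : (rel.toList == "Settings/config.json".toList) = false := by
      simp only [beq_eq_false_iff_ne]
      intro he; exact hns (he ▸ (by decide : '/' ∈ "Settings/config.json".toList))
    have nsw : PySem.Chars.startswith rel.toList "Scripts_info_extract/".toList = false := by
      cases hsw : PySem.Chars.startswith rel.toList "Scripts_info_extract/".toList with
      | false => rfl
      | true =>
        have hpre := (PySem.Chars.startswith_iff _ _).mp hsw
        exact absurd (hpre.subset (by decide : '/' ∈ "Scripts_info_extract/".toList)) hns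
    simp only [ne1, ne2, nsw]
    simp
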